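-- pv_equiv track=rewrite | github.com/Mottschi/Advent_Of_Code_2023 | python/day02.py | part_two
-- ===== SOURCE A (Python) =====
-- def part_two(data):
-- 	summe = 0
-- 	for game in data:
-- 		max_amounts_required = {'green': 0,
-- 					'red': 0,
-- 					'blue': 0}
-- 		for set in game:
-- 			for color in set:
-- 				if set[color] > max_amounts_required[color]:
-- 					max_amounts_required[color] = set[color]
-- 		power = max_amounts_required['blue'] * max_amounts_required['red'] * max_amounts_required['green']
-- 		summe += power
-- 	return summe
-- ===== SOURCE B (Python) =====
-- def part_two(data):
--     total = 0
--     for game in data: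
--         pairs = [('blue', 0), ('red', 0), ('green', 0)]
--         for s in game:
--             pairs += list(s.items())
--         pairs.sort(key=lambda p: p[1], reverse=True)
--         best = {'blue': None, 'red': None, 'green': None}
--         for color, n in pairs:
--             if best[color] is None:
--                 best[color] = n
--         total += best['blue'] * best['red'] * best['green']
--     return total
-- ===== Notes on version B (the rewrite author's own statement) =====
-- stated objective: alternative
-- what changed: B replaces A's online per-color running-maximum comparisons with a sort-then-scan: all (color,count) pairs of a game (seeded with zeros) are sorted descending by count and the first pair seen for each color, recorded in a None-initialized three-key dict, is that color's maximum.
import Mathlib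
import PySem

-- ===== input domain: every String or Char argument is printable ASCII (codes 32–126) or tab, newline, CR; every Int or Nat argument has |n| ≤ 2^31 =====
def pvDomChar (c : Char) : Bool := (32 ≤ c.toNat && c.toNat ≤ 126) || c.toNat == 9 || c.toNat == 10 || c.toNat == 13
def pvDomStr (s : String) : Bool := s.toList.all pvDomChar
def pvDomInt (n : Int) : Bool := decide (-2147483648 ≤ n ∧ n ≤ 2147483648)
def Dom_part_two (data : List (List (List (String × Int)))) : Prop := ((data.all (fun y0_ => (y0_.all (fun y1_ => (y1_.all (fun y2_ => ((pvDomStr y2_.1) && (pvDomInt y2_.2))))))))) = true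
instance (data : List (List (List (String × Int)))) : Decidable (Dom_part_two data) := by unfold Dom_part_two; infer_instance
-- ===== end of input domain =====

-- B replaces A's online per-color running-maximum with sort-then-scan: all (color,count) pairs
-- of a game (seeded with zeros) sorted descending by count, then first-seen per color via
-- setdefault is that color's maximum; objective: alternative decomposition, no speed claim.

-- ===== PORT A =====
-- Each inner Python dict argument is an association list; PySem.Dict.ofList models the dict
-- (insertion order, last value wins), and iterating the dict is iterating .items. Where Python A
-- raises KeyError (a color other than green/red/blue), the port reads getD _ 0; Pre_ excludes
-- exactly those inputs.
def part_two (data : List (List (List (String × Int)))) : Int :=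
  data.foldl (fun summe game =>
    let m0 : PySem.Dict String Int :=
      ((PySem.Dict.empty.insert "green" 0).insert "red" 0).insert "blue" 0
    let m := game.foldl (fun m s =>
      (PySem.Dict.ofList s).items.foldl (fun m p =>
        if p.2 > m.getD p.1 0 then m.insert p.1 p.2 else m) m) m0
    summe + m.getD "blue" 0 * m.getD "red" 0 * m.getD "green" 0) 0

-- ===== PORT B =====
-- pairs.sort(key=..., reverse=True) is PySem.List.sorted (stable). best is a three-key dict
-- of Option Int (None = not yet seen); reading best[color] raises KeyError on a color other
-- than green/red/blue exactly like A's dict read — Pre_ excludes those inputs, so the port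
-- reads getD _ none there. The final best['blue'/'red'/'green'] reads always find some value
-- (the seed pairs mark all three colors), read back with .getD 0.
def part_two_alt (data : List (List (List (String × Int)))) : Int :=
  data.foldl (fun total game =>
    let pairs : List (String × Int) :=
      game.foldl (fun pairs s => pairs ++ (PySem.Dict.ofList s).items)
        [("blue", 0), ("red", 0), ("green", 0)]
    let sortedPairs := PySem.List.sorted pairs (fun p => p.2) true
    let best := sortedPairs.foldl (fun d p =>
        if d.getD p.1 none = none then d.insert p.1 (some p.2) else d)
      (((PySem.Dict.empty.insert "blue" none).insert "red" none).insert "green"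
        (none : Option Int))
    total + (best.getD "blue" none).getD 0 * (best.getD "red" none).getD 0
          * (best.getD "green" none).getD 0) 0

-- ===== PRECONDITION & SPEC =====
-- Pre_ excludes exactly the inputs on which the Python A raises KeyError:
-- a set containing a color other than 'green'/'red'/'blue'.
def Pre_part_two (data : List (List (List (String × Int)))) : Prop :=
  (data.all (fun game => game.all (fun s => s.all (fun p =>
    p.1 == "green" || p.1 == "red" || p.1 == "blue")))) = true
instance (data : List (List (List (String × Int)))) : Decidable (Pre_part_two data) := by unfold Pre_part_two; infer_instance
def pvWitness_part_two : (List (List (List (String × Int)))) :=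
  [[[("green", 1), ("red", 2), ("blue", 3)]]]

def Spec_part_two (data : List (List (List (String × Int)))) (out : Int) : Prop := out = part_two_alt data
instance (data : List (List (List (String × Int)))) (out : Int) : Decidable (Spec_part_two data out) := by unfold Spec_part_two; infer_instance

-- ===== CLAIM (what is proved, stated in full; the proofs are below) =====
def Claim_equal_part_two : Prop := ∀ (data : List (List (List (String × Int)))), Dom_part_two data → Pre_part_two data → Spec_part_two data (part_two data)

-- ===== LEMMAS AND PROOFS =====

-- A's running-max update at key c, read back: one filtered fold
theorem getD_maxfold (l : List (String × Int)) (m : PySem.Dict String Int) (c : String) :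
    (l.foldl (fun m p => if p.2 > m.getD p.1 0 then m.insert p.1 p.2 else m) m).getD c 0
      = ((l.filter (fun p => p.1 == c)).map (·.2)).foldl (fun a v => if v > a then v else a) (m.getD c 0) := by
  induction l generalizing m with
  | nil => simp
  | cons p t ih =>
    simp only [List.foldl_cons, List.filter_cons]
    by_cases hc : p.1 = c
    · subst hc
      simp only [beq_self_eq_true, if_pos, List.map_cons, List.foldl_cons]
      rw [ih]
      by_cases hgt : p.2 > m.getD p.1 0
      · rw [if_pos hgt, if_pos hgt, PySem.Dict.getD_insert_self]
      · rw [if_neg hgt, if_neg hgt]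
    · have hb : (p.1 == c) = false := by simp [hc]
      rw [hb]
      simp only [Bool.false_eq_true, if_false]
      rw [ih]
      by_cases hgt : p.2 > m.getD p.1 0
      · rw [if_pos hgt, PySem.Dict.getD_insert]
        rw [if_neg (fun h => hc h.symm)]
      · rw [if_neg hgt]

-- A's nested loop over the sets of a game is the same fold over the flattened pair list
theorem foldl_flatMap_step (game : List (List (String × Int))) (m : PySem.Dict String Int) :
    game.foldl (fun m s =>
        (PySem.Dict.ofList s).items.foldl (fun m p =>
          if p.2 > m.getD p.1 0 then m.insert p.1 p.2 else m) m) m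
      = (game.flatMap (fun s => (PySem.Dict.ofList s).items)).foldl (fun m p =>
          if p.2 > m.getD p.1 0 then m.insert p.1 p.2 else m) m := by
  induction game generalizing m with
  | nil => rfl
  | cons s t ih => simp only [List.foldl_cons, List.flatMap_cons, List.foldl_append, ih]

-- B's pair-collecting loop builds the seed list followed by the flattened pair list
theorem pairs_eq_flatMap (game : List (List (String × Int))) (init : List (String × Int)) :
    game.foldl (fun pairs s => pairs ++ (PySem.Dict.ofList s).items) init
      = init ++ game.flatMap (fun s => (PySem.Dict.ofList s).items) := by
  induction game generalizing init with
  | nil => simp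
  | cons s t ih => simp [List.foldl_cons, ih]

theorem foldl_ite_max (vals : List Int) (a : Int) :
    vals.foldl (fun a v => if v > a then v else a) a = vals.foldl max a := by
  induction vals generalizing a with
  | nil => rfl
  | cons v t ih =>
    simp only [List.foldl_cons, ih]
    congr 1
    by_cases h : v > a
    · rw [if_pos h, max_eq_right h.le]
    · rw [if_neg h, max_eq_left (le_of_not_gt h)]

-- foldl max reaches the stated upper bound that is attained
theorem foldl_max_eq (l : List Int) (a m : Int)
    (hmem : m = a ∨ m ∈ l) (ha : a ≤ m) (hub : ∀ y ∈ l, y ≤ m) :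
    l.foldl max a = m := by
  induction l generalizing a with
  | nil =>
    rcases hmem with h | h
    · exact h.symm
    · cases h
  | cons v t ih =>
    simp only [List.foldl_cons]
    apply ih
    · rcases hmem with h | h
      · left; subst h
        exact le_antisymm (le_max_left _ _) (max_le le_rfl (hub v (by simp)))
      · rcases List.mem_cons.mp h with h | h
        · left; subst h
          exact le_antisymm (le_max_right _ _) (max_le ha le_rfl)
        · right; exact h
    · exact max_le ha (hub v (by simp))
    · exact fun y hy => hub y (by simp [hy])

-- B's first-seen fold, read back at key c: the FIRST pair with that key
theorem getD_firstseen_fold (l : List (String × Int)) (d : PySem.Dict String (Option Int)) (c : String) :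
    (l.foldl (fun d p => if d.getD p.1 none = none then d.insert p.1 (some p.2) else d) d).getD c none
      = ((d.getD c none).or ((l.find? (fun p => p.1 == c)).map (·.2))) := by
  induction l generalizing d with
  | nil => simp
  | cons p t ih =>
    simp only [List.foldl_cons]
    rw [ih]
    by_cases hc : p.1 = c
    · subst hc
      rw [List.find?_cons_of_pos (by simp)]
      by_cases hd : d.getD p.1 none = none
      · rw [if_pos hd, PySem.Dict.getD_insert_self, hd]
        rfl
      · rw [if_neg hd]
        cases h : d.getD p.1 none
        · exact absurd h hd
        · simp
    · rw [List.find?_cons_of_neg (by simp [hc])]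
      by_cases hd : d.getD p.1 none = none
      · rw [if_pos hd, PySem.Dict.getD_insert, if_neg (fun h => hc h.symm)]
      · rw [if_neg hd]

-- per game and per color: A's final running maximum = B's first-seen value after the descending sort
theorem color_eq (game : List (List (String × Int))) (c : String)
    (hA : ((((PySem.Dict.empty.insert "green" 0).insert "red" 0).insert "blue" (0:Int))).getD c 0 = 0)
    (hB : ((((PySem.Dict.empty.insert "blue" none).insert "red" none).insert "green"
        (none : Option Int))).getD c none = none)
    (hSeed : (([("blue", 0), ("red", 0), ("green", 0)] : List (String × Int)).filter
        (fun p => p.1 == c)) = [(c, 0)]) :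
    (game.foldl (fun m s =>
        (PySem.Dict.ofList s).items.foldl (fun m p =>
          if p.2 > m.getD p.1 0 then m.insert p.1 p.2 else m) m)
      (((PySem.Dict.empty.insert "green" 0).insert "red" 0).insert "blue" 0)).getD c 0
    = ((game.foldl (fun pairs s => pairs ++ (PySem.Dict.ofList s).items)
          [("blue", 0), ("red", 0), ("green", 0)]
        |> (fun pairs => PySem.List.sorted pairs (fun p => p.2) true)
        |> (fun sp => sp.foldl (fun d p =>
              if d.getD p.1 none = none then d.insert p.1 (some p.2) else d)
              (((PySem.Dict.empty.insert "blue" none).insert "red" none).insert "green"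
                (none : Option Int)))).getD c none |>.getD 0) := by
  rw [foldl_flatMap_step, getD_maxfold, hA, foldl_ite_max, pairs_eq_flatMap]
  set flat := game.flatMap (fun s => (PySem.Dict.ofList s).items) with hflat
  set P : List (String × Int) := [("blue", 0), ("red", 0), ("green", 0)] ++ flat with hP
  set S := PySem.List.sorted P (fun p => p.2) true with hS
  -- B's read-back is the head of the filtered sorted list
  have hfiltP : P.filter (fun p => p.1 == c) = (c, 0) :: flat.filter (fun p => p.1 == c) := by
    rw [hP, List.filter_append, hSeed]; rfl
  have hperm : (S.filter (fun p => p.1 == c)).Perm (P.filter (fun p => p.1 == c)) :=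
    List.Perm.filter _ (PySem.List.sorted_perm P (fun p => p.2) true)
  have hne : S.filter (fun p => p.1 == c) ≠ [] := by
    intro h
    have := hperm.length_eq
    rw [h, hfiltP] at this
    simp at this
  obtain ⟨h, t, hht⟩ := List.exists_cons_of_ne_nil hne
  have hpw : S.Pairwise (fun a b => b.2 ≤ a.2) :=
    PySem.List.sorted_pairwise_rev P (fun p => p.2)
  have hdom : ∀ y ∈ t, y.2 ≤ h.2 := by
    have := (hht ▸ (List.Pairwise.filter _ hpw))
    exact fun y hy => (List.pairwise_cons.mp this).1 y hy
  have hdomP : ∀ y ∈ P.filter (fun p => p.1 == c), y.2 ≤ h.2 := by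
    intro y hy
    have : y ∈ h :: t := hht ▸ hperm.mem_iff.mpr hy
    rcases List.mem_cons.mp this with h' | hy'
    · subst h'; exact le_rfl
    · exact hdom y hy'
  have hmemP : h ∈ P.filter (fun p => p.1 == c) := by
    apply hperm.mem_iff.mp; rw [hht]; simp
  -- B's getD = h.2
  have hBval : (((S.foldl (fun d p =>
        if d.getD p.1 none = none then d.insert p.1 (some p.2) else d)
      (((PySem.Dict.empty.insert "blue" none).insert "red" none).insert "green"
        (none : Option Int))).getD c none).getD 0) = h.2 := by
    have hfind : S.find? (fun p => p.1 == c) = some h := by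
      rw [← List.head?_filter, hht]; rfl
    rw [getD_firstseen_fold, hB, hfind]
    rfl
  rw [hBval]
  -- A's foldl max = h.2 via the characterisation
  apply foldl_max_eq
  · rw [hfiltP] at hmemP
    rcases List.mem_cons.mp hmemP with rfl | hm
    · left; rfl
    · right; exact List.mem_map.mpr ⟨h, hm, rfl⟩
  · have : ((c, 0) : String × Int) ∈ P.filter (fun p => p.1 == c) := by rw [hfiltP]; simp
    exact hdomP _ this
  · intro y hy
    obtain ⟨p, hp, rfl⟩ := List.mem_map.mp hy
    exact hdomP p (by rw [hfiltP]; simp [hp])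

-- ===== VERDICT (by name: the statement is the Claim_ definition above) =====
theorem part_two_spec : Claim_equal_part_two := by
  intro data _ _
  unfold Spec_part_two part_two part_two_alt
  apply PySem.List.foldl_congr_mem
  intro acc game _
  simp only
  congr 1
  rw [color_eq game "blue" (by decide) (by decide) (by decide),
      color_eq game "red" (by decide) (by decide) (by decide),
      color_eq game "green" (by decide) (by decide) (by decide)]
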